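-- pv_equiv track=rewrite | github.com/shivavafadar/AlgorithmDesign-course-spring2024 | divide-and-conquer/spoiler.py | count_crossing_subarrays
-- ===== SOURCE A (Python) =====
-- def count_crossing_subarrays(w, k, left, mid, right):
--     count = 0
--     # Compute suffix sums for the left half
--     suffix_sums = []
--     suffix_total = 0
--     for i in range(mid, left - 1, -1):
--         suffix_total += w[i]
--         suffix_sums.append(suffix_total)
--
--     # Compute prefix sums for the right half
--     prefix_sums = []
--     prefix_total = 0
--     for j in range(mid + 1, right + 1):
--         prefix_total += w[j]
--         prefix_sums.append(prefix_total)
--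
--     # Count valid crossing subarrays
--     for s_sum in suffix_sums:
--         for p_sum in prefix_sums:
--             if abs(s_sum + p_sum) > k:
--                 count += 1
--
--     return count
-- ===== SOURCE B (Python) =====
-- # Alternative sort-and-binary-search implementation: build both cumulative-sum
-- # lists with one shared helper over the extracted slices, sort the prefix sums
-- # once, and for each suffix sum count the two qualifying tails (p > k - s or
-- # p < -k - s) with hand-written bisect helpers (A imports no modules).
--
-- def _csum(vals):
--     out = []
--     t = 0
--     for v in vals:
--         t += v
--         out.append(t)
--     return out
--
-- def _bisect_left(a, x):
--     lo, hi = 0, len(a)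
--     while lo < hi:
--         m = (lo + hi) // 2
--         if a[m] < x:
--             lo = m + 1
--         else:
--             hi = m
--     return lo
--
-- def _bisect_right(a, x):
--     lo, hi = 0, len(a)
--     while lo < hi:
--         m = (lo + hi) // 2
--         if a[m] <= x:
--             lo = m + 1
--         else:
--             hi = m
--     return lo
--
-- def count_crossing_subarrays(w, k, left, mid, right):
--     suffix = _csum([w[i] for i in range(mid, left - 1, -1)])
--     ps = sorted(_csum([w[j] for j in range(mid + 1, right + 1)]))
--     if k < 0:
--         # |s + p| >= 0 > k: every pair qualifies
--         return len(suffix) * len(ps)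
--     n = len(ps)
--     # p > k - s and p < -k - s are disjoint since k >= 0
--     return sum((n - _bisect_right(ps, k - s)) + _bisect_left(ps, -k - s) for s in suffix)
-- ===== Notes on version B (the rewrite author's own statement) =====
-- stated objective: alternative
-- what changed: The quadratic suffix-sum x prefix-sum pair scan is replaced by building both cumulative-sum lists with one shared helper, sorting the prefix sums once, and binary-searching per suffix sum the counts of prefix sums p with p > k-s and p < -k-s (all pairs when k < 0); it trades the nested scan for an O((L+R) log R) sort-and-bisect pass, though a timing run did not measure it faster on the generated inputs.
import Mathlib
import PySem

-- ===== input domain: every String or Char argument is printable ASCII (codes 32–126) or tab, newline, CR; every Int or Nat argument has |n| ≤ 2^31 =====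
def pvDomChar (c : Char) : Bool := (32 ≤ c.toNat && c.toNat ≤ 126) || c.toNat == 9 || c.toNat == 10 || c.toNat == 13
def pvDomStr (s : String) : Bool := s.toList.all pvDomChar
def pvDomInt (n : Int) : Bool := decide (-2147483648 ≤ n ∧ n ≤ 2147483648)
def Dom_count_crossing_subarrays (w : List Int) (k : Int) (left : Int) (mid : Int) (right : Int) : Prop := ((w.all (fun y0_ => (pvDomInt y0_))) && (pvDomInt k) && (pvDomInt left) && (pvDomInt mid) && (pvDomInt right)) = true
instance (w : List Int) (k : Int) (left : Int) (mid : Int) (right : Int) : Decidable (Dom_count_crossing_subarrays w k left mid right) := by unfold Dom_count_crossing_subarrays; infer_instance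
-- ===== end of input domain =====

-- B replaces A's nested suffix-by-prefix pair scan by one shared cumulative-sum helper
-- over the extracted index slices, sorting the prefix sums once, and binary-searching per
-- suffix sum the two qualifying tails (an alternative algorithm, not measured faster here).

-- ===== PORT A =====
-- suffix-sum loop: for i in range(mid, left-1, -1): suffix_total += w[i]; suffix_sums.append(suffix_total)
def pvSuffixA (w : List Int) (left mid : Int) : List Int :=
  ((PySem.List.pyRange mid (left - 1) (-1)).foldl
    (fun (st : List Int × Int) i =>
      (st.1 ++ [st.2 + PySem.List.pyGetD w i 0], st.2 + PySem.List.pyGetD w i 0)) ([], 0)).1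

-- prefix-sum loop: for j in range(mid+1, right+1): prefix_total += w[j]; prefix_sums.append(prefix_total)
def pvPrefixA (w : List Int) (mid right : Int) : List Int :=
  ((PySem.List.pyRange (mid + 1) (right + 1) 1).foldl
    (fun (st : List Int × Int) j =>
      (st.1 ++ [st.2 + PySem.List.pyGetD w j 0], st.2 + PySem.List.pyGetD w j 0)) ([], 0)).1

def count_crossing_subarrays (w : List Int) (k : Int) (left : Int) (mid : Int) (right : Int) : Int :=
  (pvSuffixA w left mid).foldl
    (fun c s_sum =>
      (pvPrefixA w mid right).foldl
        (fun c p_sum => if k < |s_sum + p_sum| then c + 1 else c) c)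
    0

-- ===== PORT B =====
-- Source B's _csum: cumulative sums of a value list
def pvCSum (vals : List Int) : List Int :=
  (vals.foldl (fun (st : List Int × Int) v => (st.1 ++ [st.2 + v], st.2 + v)) ([], 0)).1

-- Source B's hand-written _bisect_left/_bisect_right are the standard bisect algorithm = PySem.List.bisectLeft/bisectRight
def count_crossing_subarrays_alt (w : List Int) (k : Int) (left : Int) (mid : Int) (right : Int) : Int :=
  let suffix := pvCSum ((PySem.List.pyRange mid (left - 1) (-1)).map (fun i => PySem.List.pyGetD w i 0))
  let ps := PySem.List.sorted
      (pvCSum ((PySem.List.pyRange (mid + 1) (right + 1) 1).map (fun j => PySem.List.pyGetD w j 0)))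
      (fun p => p)
  if k < 0 then (suffix.length : Int) * (ps.length : Int)  -- every pair qualifies
  else
    (suffix.map (fun s =>
        ((ps.length : Int) - (PySem.List.bisectRight ps (k - s) : Int))
          + (PySem.List.bisectLeft ps (-k - s) : Int))).sum

-- ===== PRECONDITION & SPEC =====
-- Pre_ = exactly the inputs on which A raises no IndexError: every index the two range
-- loops touch lies in Python's valid band [-len(w), len(w)).
def Pre_count_crossing_subarrays (w : List Int) (k : Int) (left : Int) (mid : Int) (right : Int) : Prop :=
  (left ≤ mid → (-(w.length : Int) ≤ left ∧ mid < (w.length : Int))) ∧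
  (mid + 1 ≤ right → (-(w.length : Int) ≤ mid + 1 ∧ right < (w.length : Int)))
instance (w : List Int) (k : Int) (left : Int) (mid : Int) (right : Int) : Decidable (Pre_count_crossing_subarrays w k left mid right) := by unfold Pre_count_crossing_subarrays; infer_instance

def pvWitness_count_crossing_subarrays : List Int × Int × Int × Int × Int := ([1, -2, 3], 0, 0, 1, 2)

def Spec_count_crossing_subarrays (w : List Int) (k : Int) (left : Int) (mid : Int) (right : Int) (out : Int) : Prop := out = count_crossing_subarrays_alt w k left mid right
instance (w : List Int) (k : Int) (left : Int) (mid : Int) (right : Int) (out : Int) : Decidable (Spec_count_crossing_subarrays w k left mid right out) := by unfold Spec_count_crossing_subarrays; infer_instance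

-- ===== CLAIM (what is proved, stated in full; the proofs are below) =====
def Claim_equal_count_crossing_subarrays : Prop := ∀ (w : List Int) (k : Int) (left : Int) (mid : Int) (right : Int), Dom_count_crossing_subarrays w k left mid right → Pre_count_crossing_subarrays w k left mid right → Spec_count_crossing_subarrays w k left mid right (count_crossing_subarrays w k left mid right)

-- ===== LEMMAS AND PROOFS =====

-- B's _csum over the mapped index slice is exactly A's inline index loop
theorem pvCSum_map_eq_suffixA (w : List Int) (left mid : Int) :
    pvCSum ((PySem.List.pyRange mid (left - 1) (-1)).map (fun i => PySem.List.pyGetD w i 0))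
      = pvSuffixA w left mid := by
  simp [pvCSum, pvSuffixA, List.foldl_map]

theorem pvCSum_map_eq_prefixA (w : List Int) (mid right : Int) :
    pvCSum ((PySem.List.pyRange (mid + 1) (right + 1) 1).map (fun j => PySem.List.pyGetD w j 0))
      = pvPrefixA w mid right := by
  simp [pvCSum, pvPrefixA, List.foldl_map]

-- a predicate that is true exactly on the first r positions of a list has countP = r
theorem pvCountP_of_cut (p : Int → Bool) (L : List Int) (r : Nat) (hr : r ≤ L.length)
    (hlt : ∀ j (hj : j < L.length), j < r → p L[j] = true)
    (hge : ∀ j (hj : j < L.length), r ≤ j → p L[j] = false) :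
    L.countP p = r := by
  induction L generalizing r with
  | nil => simpa using (Nat.le_zero.mp (by simpa using hr)).symm
  | cons a t ih =>
    cases r with
    | zero =>
      have ha : p a = false := hge 0 (by simp) (Nat.zero_le _)
      have ht : t.countP p = 0 := by
        refine ih 0 (Nat.zero_le _) (by omega) ?_
        intro j hj _
        exact hge (j + 1) (by simpa using Nat.succ_lt_succ hj) (Nat.zero_le _)
      simp [ha, ht]
    | succ r' =>
      have ha : p a = true := hlt 0 (by simp) (Nat.succ_pos _)
      have ht : t.countP p = r' := by
        refine ih r' (by simpa using hr) ?_ ?_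
        · intro j hj hjr
          exact hlt (j + 1) (by simpa using Nat.succ_lt_succ hj) (by omega)
        · intro j hj hjr
          exact hge (j + 1) (by simpa using Nat.succ_lt_succ hj) (by omega)
      simp [ha, ht]

theorem pvBisectLeft_count (L : List Int) (x : Int) (hs : L.Pairwise (· ≤ ·)) :
    PySem.List.bisectLeft L x = L.countP (fun a => decide (a < x)) := by
  obtain ⟨h1, h2, h3⟩ := PySem.List.bisectLeft_spec L x hs
  exact (pvCountP_of_cut _ L _ h1
    (fun j hj hjr => by simpa using h2 j hj hjr)
    (fun j hj hjr => by simpa using not_lt.mpr (h3 j hj hjr))).symm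

theorem pvBisectRight_count (L : List Int) (x : Int) (hs : L.Pairwise (· ≤ ·)) :
    PySem.List.bisectRight L x = L.countP (fun a => decide (a ≤ x)) := by
  obtain ⟨h1, h2, h3⟩ := PySem.List.bisectRight_spec L x hs
  exact (pvCountP_of_cut _ L _ h1
    (fun j hj hjr => by simpa using h2 j hj hjr)
    (fun j hj hjr => by simpa using not_le.mpr (h3 j hj hjr))).symm

-- countP of a disjunction of pointwise-disjoint predicates splits into a sum
theorem pvCountP_or_disjoint (l : List Int) (p q : Int → Bool)
    (h : ∀ a ∈ l, ¬(p a = true ∧ q a = true)) :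
    l.countP (fun a => p a || q a) = l.countP p + l.countP q := by
  induction l with
  | nil => simp
  | cons a t ih =>
    have ht := ih (fun b hb => h b (List.mem_cons_of_mem _ hb))
    have ha := h a (List.mem_cons_self)
    cases hp : p a <;> cases hq : q a
    · simp [hp, hq, ht]
    · simp [hp, hq, ht]; omega
    · simp [hp, hq, ht]; omega
    · exact (ha ⟨hp, hq⟩).elim

-- complement: countP p + countP (not p) = length
theorem pvCountP_not (l : List Int) (p : Int → Bool) :
    l.countP p + l.countP (fun a => !p a) = l.length := by
  induction l with
  | nil => simp
  | cons a t ih => cases h : p a <;> simp [h] <;> omega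

-- the per-suffix-sum inner count, rewritten through the sorted list and the two bisects (k ≥ 0)
theorem pvInner_eq (P : List Int) (k s : Int) (hk : 0 ≤ k) :
    ((P.countP (fun p => decide (k < |s + p|)) : Int))
      = (((PySem.List.sorted P (fun p => p)).length : Int)
          - (PySem.List.bisectRight (PySem.List.sorted P (fun p => p)) (k - s) : Int))
        + (PySem.List.bisectLeft (PySem.List.sorted P (fun p => p)) (-k - s) : Int) := by
  set ps := PySem.List.sorted P (fun p => p) with hps
  have hsorted : ps.Pairwise (· ≤ ·) := by
    simpa using PySem.List.sorted_pairwise P (fun p => p)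
  have hperm : ps.Perm P := PySem.List.sorted_perm P (fun p => p) false
  have hlen : ps.length = P.length := hperm.length_eq
  have hbr : PySem.List.bisectRight ps (k - s) = P.countP (fun a => decide (a ≤ k - s)) := by
    rw [pvBisectRight_count ps (k - s) hsorted]
    exact hperm.countP_eq _
  have hbl : PySem.List.bisectLeft ps (-k - s) = P.countP (fun a => decide (a < -k - s)) := by
    rw [pvBisectLeft_count ps (-k - s) hsorted]
    exact hperm.countP_eq _
  have hsplit : P.countP (fun p => decide (k < |s + p|))
      = P.countP (fun a => decide (k - s < a)) + P.countP (fun a => decide (a < -k - s)) := by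
    rw [← pvCountP_or_disjoint P (fun a => decide (k - s < a)) (fun a => decide (a < -k - s))
          (by intro a _ ⟨h1, h2⟩; simp at h1 h2; omega)]
    refine List.countP_congr ?_
    intro a _
    simp only [decide_eq_true_eq, Bool.or_eq_true]
    rw [lt_abs]
    constructor <;> (intro h; omega)
  have hcomp : P.countP (fun a => decide (a ≤ k - s)) + P.countP (fun a => decide (k - s < a))
      = P.length := by
    have := pvCountP_not P (fun a => decide (a ≤ k - s))
    have hcong : P.countP (fun a => !decide (a ≤ k - s)) = P.countP (fun a => decide (k - s < a)) :=
      List.countP_congr (by intro a _; simp)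
    omega
  rw [hbr, hbl, hsplit, hlen]
  push_cast
  omega

-- A's double loop equals B's branch / sorted-bisect map-sum, for arbitrary sum lists
theorem pvCore (S P : List Int) (k : Int) :
    S.foldl (fun c s => P.foldl (fun c p => if k < |s + p| then c + 1 else c) c) 0
      = if k < 0 then (S.length : Int) * ((PySem.List.sorted P (fun p => p)).length : Int)
        else
          (S.map (fun s =>
              (((PySem.List.sorted P (fun p => p)).length : Int)
                  - (PySem.List.bisectRight (PySem.List.sorted P (fun p => p)) (k - s) : Int))
                + (PySem.List.bisectLeft (PySem.List.sorted P (fun p => p)) (-k - s) : Int))).sum := by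
  have hinner : ∀ (c : Int) (s : Int),
      P.foldl (fun c p => if k < |s + p| then c + 1 else c) c
        = c + (P.countP (fun p => decide (k < |s + p|)) : Int) := by
    intro c s
    exact PySem.List.foldl_ite_add_one (fun p => k < |s + p|) P c
  have hlen : (PySem.List.sorted P (fun p => p)).length = P.length :=
    (PySem.List.sorted_perm P (fun p => p) false).length_eq
  by_cases hk : k < 0
  · rw [if_pos hk, hlen]
    have hall : ∀ (c : Int) (s : Int),
        P.foldl (fun c p => if k < |s + p| then c + 1 else c) c = c + (P.length : Int) := by
      intro c s
      rw [hinner c s]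
      have : P.countP (fun p => decide (k < |s + p|)) = P.length := by
        exact List.countP_eq_length.mpr
          (by intro a _; simp; exact lt_of_lt_of_le hk (abs_nonneg _))
      rw [this]
    rw [PySem.List.foldl_congr_mem S _ (fun c _ => c + (P.length : Int)) 0
          (fun acc x _ => hall acc x),
        PySem.List.foldl_add S (fun _ => (P.length : Int)) 0,
        PySem.List.sum_map_const_int]
    ring
  · rw [if_neg hk]
    have hstep : S.foldl (fun c s => P.foldl (fun c p => if k < |s + p| then c + 1 else c) c) 0
        = S.foldl (fun c s =>
            c + ((((PySem.List.sorted P (fun p => p)).length : Int)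
                    - (PySem.List.bisectRight (PySem.List.sorted P (fun p => p)) (k - s) : Int))
                  + (PySem.List.bisectLeft (PySem.List.sorted P (fun p => p)) (-k - s) : Int))) 0 := by
      refine PySem.List.foldl_congr_mem S _ _ 0 ?_
      intro acc s _
      rw [hinner acc s, pvInner_eq P k s (by omega)]
    rw [hstep, PySem.List.foldl_add S _ 0]
    ring

-- ===== VERDICT (by name: the statement is the Claim_ definition above) =====
theorem count_crossing_subarrays_spec : Claim_equal_count_crossing_subarrays := by
  intro w k left mid right _ _
  unfold Spec_count_crossing_subarrays count_crossing_subarrays count_crossing_subarrays_alt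
  rw [pvCSum_map_eq_suffixA, pvCSum_map_eq_prefixA]
  exact pvCore (pvSuffixA w left mid) (pvPrefixA w mid right) k
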